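-- pv_equiv track=rewrite | github.com/iyakovlev23/some_sage_code | iyakovlev/unicellular_generation.py | dyck_word_to_planar_tree
-- ===== SOURCE A (Python) =====
-- def dyck_word_to_planar_tree(w):
--     # returns edge permutation (assuming face permutation is (1,2,3,...))
--     # 1 is the root half-edge
--     ep=[]
--     ind=[] #indices of unfinished edges in ep
--     for i in range(1,len(w)+1):
--         if w[i-1]==1:
--             ep.append([i,None])
--             ind.append(len(ep)-1)
--         else:
--             ep[ind.pop()][1]=i
--     return [tuple(i) for i in ep]
-- ===== SOURCE B (Python) =====
-- def dyck_word_to_planar_tree(w):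
--     # recursive-descent parser over the Dyck word's nesting structure
--     # (shared edges list filled in opening order; closing index set on return)
--     edges = []
--     def parse(pos):
--         # consume a maximal balanced run starting at position pos;
--         # return the first position not consumed
--         while pos <= len(w) and w[pos - 1] == 1:
--             k = len(edges)
--             edges.append([pos, None])
--             close = parse(pos + 1)
--             if close > len(w):
--                 raise ValueError("not a Dyck word: unmatched up-step")
--             edges[k][1] = close
--             pos = close + 1
--         return pos
--     if parse(1) != len(w) + 1:
--         raise ValueError("not a Dyck word: unmatched down-step")
--     return [tuple(e) for e in edges]
-- ===== Notes on version B (the rewrite author's own statement) =====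
-- stated objective: alternative
-- what changed: Replaces A's flat loop with an explicit stack of unfinished-edge indices by a recursive-descent parser over the word's nesting structure that fills each edge's closing index when its balanced block returns, and rejects non-Dyck input with ValueError.
-- outside the precondition, e.g. on dyck_word_to_planar_tree([1]): A returns [(1, None)], B raises ValueError; on dyck_word_to_planar_tree([1, 1, -1]): A returns [(1, None), (2, 3)], B raises ValueError
import Mathlib
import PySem

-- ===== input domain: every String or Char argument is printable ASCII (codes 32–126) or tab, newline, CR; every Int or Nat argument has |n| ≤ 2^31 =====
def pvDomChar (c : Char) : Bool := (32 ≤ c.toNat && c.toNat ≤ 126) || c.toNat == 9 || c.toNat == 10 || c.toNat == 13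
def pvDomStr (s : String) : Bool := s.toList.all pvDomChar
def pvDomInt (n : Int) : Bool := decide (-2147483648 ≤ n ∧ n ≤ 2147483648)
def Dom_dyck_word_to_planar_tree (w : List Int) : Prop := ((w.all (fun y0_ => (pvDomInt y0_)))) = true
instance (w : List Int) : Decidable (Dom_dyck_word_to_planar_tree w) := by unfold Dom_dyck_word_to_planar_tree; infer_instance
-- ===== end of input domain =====

-- B replaces A's explicit stack of unfinished-edge indices by a recursive-descent
-- parser over the Dyck word's nesting structure (objective: alternative; same cost).


-- ===== PORT A =====
-- set the second component of edge k (Python: ep[ind.pop()][1] = i)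
def pvSetClose (e : List (Int × Option Int)) (k : Nat) (i : Int) : List (Int × Option Int) :=
  e.modify k (fun p => (p.1, some i))

-- A's loop over i = 1..len(w); ep = edge list, ind = stack of unfinished indices
-- (Python appends/pops at the list's end = LIFO; modelled as cons/head).
def pvLoopA : List Int → Int → List (Int × Option Int) → List Nat → List (Int × Option Int)
  | [], _, ep, _ => ep
  | x :: rest, i, ep, ind =>
    if x = 1 then
      pvLoopA rest (i + 1) (ep ++ [(i, none)]) (ep.length :: ind)
    else
      match ind with
      | [] => ep  -- Python raises IndexError (pop from empty list) here; excluded by Pre_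
      | k :: ind' => pvLoopA rest (i + 1) (pvSetClose ep k i) ind'

def dyck_word_to_planar_tree (w : List Int) : List (Int × Int) :=
  -- final [tuple(i) for i in ep]; .getD 0: Python would yield (i, None) here,
  -- outside the declared return type — excluded by Pre_
  (pvLoopA w 1 [] []).map (fun p => (p.1, p.2.getD 0))

-- ===== PORT B =====
-- parse(pos) of Source B; `rest` mirrors the unread suffix w[pos-1:], so the Python
-- test `pos <= len(w) and w[pos-1] == 1` is exactly "rest has head 1".
-- Fuel bounds the recursion depth; it never runs out when rest.length ≤ fuel.
def pvParseB : Nat → List Int → Int → List (Int × Option Int) →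
    List Int × Int × List (Int × Option Int)
  | 0, rest, pos, edges => (rest, pos, edges)
  | _ + 1, [], pos, edges => ([], pos, edges)
  | f + 1, x :: rest, pos, edges =>
    if x = 1 then
      let k := edges.length
      let t := pvParseB f rest (pos + 1) (edges ++ [(pos, none)])
      match t with
      | ([], close, e2) => ([], close, e2)          -- close > len(w): edge k stays open
      | (_ :: r3, close, e2) => pvParseB f r3 (close + 1) (pvSetClose e2 k close)
    else (x :: rest, pos, edges)

def dyck_word_to_planar_tree_alt (w : List Int) : List (Int × Int) :=
  -- Source B raises ValueError when the parse stops early or an edge stays open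
  -- (non-Dyck input, excluded by Pre_); there the port returns the edges computed so far
  ((pvParseB w.length w 1 []).2.2).map (fun p => (p.1, p.2.getD 0))

-- ===== PRECONDITION & SPEC =====
-- Pre_ = the Dyck words, A's typed domain: it excludes words with a negative
-- prefix sum, on which Python A raises IndexError (pop from an empty stack), and
-- words with unmatched opening steps, on which A returns tuples containing None —
-- not values of the declared type (Python B raises ValueError on both kinds).
def Pre_dyck_word_to_planar_tree (w : List Int) : Prop :=
  (∀ s ∈ w.scanl (fun a x => a + (if x = 1 then (1 : Int) else -1)) 0, 0 ≤ s) ∧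
  w.foldl (fun a x => a + (if x = 1 then (1 : Int) else -1)) 0 = 0
instance (w : List Int) : Decidable (Pre_dyck_word_to_planar_tree w) := by
  unfold Pre_dyck_word_to_planar_tree; infer_instance

def pvWitness_dyck_word_to_planar_tree : List Int := [1, 1, -1, -1, 1, -1]

def Spec_dyck_word_to_planar_tree (w : List Int) (out : List (Int × Int)) : Prop := out = dyck_word_to_planar_tree_alt w
instance (w : List Int) (out : List (Int × Int)) : Decidable (Spec_dyck_word_to_planar_tree w out) := by unfold Spec_dyck_word_to_planar_tree; infer_instance

-- ===== CLAIM (what is proved, stated in full; the proofs are below) =====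
def Claim_equal_dyck_word_to_planar_tree : Prop := ∀ (w : List Int), Dom_dyck_word_to_planar_tree w → Pre_dyck_word_to_planar_tree w → Spec_dyck_word_to_planar_tree w (dyck_word_to_planar_tree w)

-- ===== LEMMAS AND PROOFS =====

-- the unread suffix returned by pvParseB is a suffix of the input (length bound)
theorem pvParseB_len : ∀ (f : Nat) (r : List Int) (p : Int) (e : List (Int × Option Int)),
    (pvParseB f r p e).1.length ≤ r.length := by
  intro f
  induction f with
  | zero => intro r p e; simp [pvParseB]
  | succ f ih =>
    intro r p e
    cases r with
    | nil => simp [pvParseB]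
    | cons x rest =>
      by_cases hx : x = 1
      · simp only [pvParseB, if_pos hx]
        have h1 := ih rest (p + 1) (e ++ [(p, none)])
        cases ht : pvParseB f rest (p + 1) (e ++ [(p, none)]) with
        | mk r2 t2 =>
          cases r2 with
          | nil => simp
          | cons y r3 =>
            have h2 := ih r3 (t2.1 + 1) (pvSetClose t2.2 e.length t2.1)
            rw [ht] at h1
            simp at h1 ⊢
            omega
      · simp [pvParseB, if_neg hx]

-- when the fuel covers the suffix, pvParseB only stops at a non-1 symbol (or the end)
theorem pvParseB_stop : ∀ (f : Nat) (r : List Int) (p : Int) (e : List (Int × Option Int)),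
    r.length ≤ f → ∀ y r3, (pvParseB f r p e).1 = y :: r3 → y ≠ 1 := by
  intro f
  induction f with
  | zero =>
    intro r p e hf y r3 h
    have : r = [] := List.eq_nil_of_length_eq_zero (Nat.le_zero.mp hf)
    subst this
    simp [pvParseB] at h
  | succ f ih =>
    intro r p e hf y r3 h
    cases r with
    | nil => simp [pvParseB] at h
    | cons x rest =>
      by_cases hx : x = 1
      · simp only [pvParseB, if_pos hx] at h
        cases ht : pvParseB f rest (p + 1) (e ++ [(p, none)]) with
        | mk r2 t2 =>
          rw [ht] at h
          cases r2 with
          | nil => simp at h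
          | cons z r4 =>
            simp only at h
            have hlen : r4.length ≤ f := by
              have := pvParseB_len f rest (p + 1) (e ++ [(p, none)])
              rw [ht] at this
              simp at this hf
              omega
            exact ih r4 (t2.1 + 1) (pvSetClose t2.2 e.length t2.1) hlen y r3 h
      · simp only [pvParseB, if_neg hx] at h
        cases h with
        | refl => exact hx
  
-- simulation: A's stack loop factors through B's parser, for ANY pending stack
theorem pvSim : ∀ (f : Nat) (r : List Int) (p : Int) (e : List (Int × Option Int))
    (ind : List Nat), r.length ≤ f →
    pvLoopA r p e ind =
      (fun t => pvLoopA t.1 t.2.1 t.2.2 ind) (pvParseB f r p e) := by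
  intro f
  induction f with
  | zero =>
    intro r p e ind hf
    have : r = [] := List.eq_nil_of_length_eq_zero (Nat.le_zero.mp hf)
    subst this
    simp [pvParseB, pvLoopA]
  | succ f ih =>
    intro r p e ind hf
    cases r with
    | nil => simp [pvParseB, pvLoopA]
    | cons x rest =>
      by_cases hx : x = 1
      · have hrest : rest.length ≤ f := by simp at hf; omega
        simp only [pvParseB, pvLoopA, if_pos hx]
        rw [ih rest (p + 1) (e ++ [(p, none)]) (e.length :: ind) hrest]
        cases ht : pvParseB f rest (p + 1) (e ++ [(p, none)]) with
        | mk r2 t2 =>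
          cases r2 with
          | nil => simp [pvLoopA]
          | cons y r3 =>
            have hy : y ≠ 1 :=
              pvParseB_stop f rest (p + 1) (e ++ [(p, none)]) hrest y r3 (by rw [ht])
            have hlen : r3.length ≤ f := by
              have := pvParseB_len f rest (p + 1) (e ++ [(p, none)])
              rw [ht] at this; simp at this; omega
            simp only [pvLoopA, if_neg hy]
            exact ih r3 (t2.1 + 1) (pvSetClose t2.2 e.length t2.1) ind hlen
      · simp [pvParseB, pvLoopA, if_neg hx]

-- the two edge lists agree on every input (A's port returns its partial/dummy
-- value exactly where B's does; Pre_ is needed only for Python-side faithfulness)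
theorem pvPorts_eq (w : List Int) :
    dyck_word_to_planar_tree w = dyck_word_to_planar_tree_alt w := by
  unfold dyck_word_to_planar_tree dyck_word_to_planar_tree_alt
  rw [pvSim w.length w 1 [] [] (le_refl _)]
  cases ht : pvParseB w.length w 1 [] with
  | mk r2 t2 =>
    cases r2 with
    | nil => simp [pvLoopA]
    | cons y r3 =>
      have hy : y ≠ 1 := pvParseB_stop w.length w 1 [] (le_refl _) y r3 (by rw [ht])
      simp [pvLoopA, if_neg hy]

-- ===== VERDICT (by name: the statement is the Claim_ definition above) =====
theorem dyck_word_to_planar_tree_spec : Claim_equal_dyck_word_to_planar_tree := by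
  intro w _ _
  exact pvPorts_eq w
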